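-- pv_equiv track=rewrite | github.com/antenehproduction/archdraw | scripts/fetch-socrata-schemas.py | detect_address_field
-- ===== SOURCE A (Python) =====
-- ADDRESS_PATTERNS = [
--     "site_address", "site_addr", "full_address", "full_addr",
--     "address", "addr", "permit_address", "address_full",
--     "location_1", "location",
-- ]
--
-- def detect_address_field(columns: list[dict]) -> str | None:
--     field_names = [c.get("fieldName") or "" for c in columns]
--     lowered = {fn.lower(): fn for fn in field_names if fn}
--     for pat in ADDRESS_PATTERNS:
--         if pat in lowered:
--             return lowered[pat]
--     # Fallback: any column whose name contains "address"
--     for fn in field_names: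
--         if "address" in fn.lower() or "addr" in fn.lower():
--             return fn
--     return None
-- ===== SOURCE B (Python) =====
-- ADDRESS_PATTERNS = [
--     "site_address", "site_addr", "full_address", "full_addr",
--     "address", "addr", "permit_address", "address_full",
--     "location_1", "location",
-- ]
--
-- RANK = {p: i for i, p in enumerate(ADDRESS_PATTERNS)}
--
-- def detect_address_field(columns):
--     best = None        # (rank, fieldName) of the best exact pattern match so far
--     fallback = None    # first column whose name merely contains "addr"
--     for c in columns:
--         fn = c.get("fieldName") or ""
--         low = fn.lower()
--         r = RANK.get(low)
--         if r is not None and (best is None or r < best[0]):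
--             best = (r, fn)
--         if fallback is None and "addr" in low:
--             fallback = fn
--     return best[1] if best is not None else fallback
-- ===== Notes on version B (the rewrite author's own statement) =====
-- stated objective: simpler
-- what changed: Replaces A's intermediate field-name list, lowered-name dict and two separate return loops with a single forward pass that keeps the best-ranked exact match (via a pattern-to-rank map) and the first 'addr' fallback; Pre_ excludes lists in which two columns carry different spellings of the same lowered field name equal to an address pattern, an unspecified first-vs-last tie where A's dict keeps the last spelling and B's forward scan the first, both defensible.
-- outside the precondition, e.g. on detect_address_field([{'fieldName': 'Address'}, {'fieldName': 'ADDRESS'}]): A returns 'ADDRESS', B returns 'Address'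
import Mathlib
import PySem

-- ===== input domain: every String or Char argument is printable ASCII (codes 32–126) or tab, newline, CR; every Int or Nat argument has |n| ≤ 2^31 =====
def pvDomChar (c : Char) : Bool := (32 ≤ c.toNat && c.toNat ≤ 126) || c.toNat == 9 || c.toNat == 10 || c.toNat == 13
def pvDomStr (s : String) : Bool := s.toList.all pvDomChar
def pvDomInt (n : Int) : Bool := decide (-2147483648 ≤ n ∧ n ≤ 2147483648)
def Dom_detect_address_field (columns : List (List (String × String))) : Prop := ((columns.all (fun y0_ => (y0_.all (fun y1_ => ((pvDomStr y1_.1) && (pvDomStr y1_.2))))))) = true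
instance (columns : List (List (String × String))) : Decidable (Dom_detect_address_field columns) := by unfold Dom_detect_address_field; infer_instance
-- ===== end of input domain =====

-- B replaces A's lowered-name dict and two return loops with one forward pass (simpler); return values agree on all inputs admitted by Pre_.

def addressPatterns : List String :=
  ["site_address", "site_addr", "full_address", "full_addr",
   "address", "addr", "permit_address", "address_full",
   "location_1", "location"]

-- 'c.get("fieldName") or ""' (shared by both ports)
def pvFn (c : List (String × String)) : String :=
  (PySem.Dict.get? (PySem.Dict.mk c) "fieldName").getD ""

-- ===== PORT A =====
-- 'lowered = {fn.lower(): fn for fn in field_names if fn}'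
def aLowered (fns : List String) : PySem.Dict String String :=
  fns.foldl (fun d fn => if fn ≠ "" then PySem.Dict.insert d (PySem.Str.lower fn) fn else d)
    PySem.Dict.empty

-- 'for pat in ADDRESS_PATTERNS: if pat in lowered: return lowered[pat]'
def aFindPat : List String → PySem.Dict String String → Option String
  | [], _ => none
  | p :: ps, d =>
    match PySem.Dict.get? d p with
    | some v => some v
    | none => aFindPat ps d

-- 'for fn in field_names: if "address" in fn.lower() or "addr" in fn.lower(): return fn'
def aFallback : List String → Option String
  | [] => none
  | fn :: rest =>
    if PySem.Str.isIn "address" (PySem.Str.lower fn) || PySem.Str.isIn "addr" (PySem.Str.lower fn)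
    then some fn else aFallback rest

def detect_address_field (columns : List (List (String × String))) : Option String :=
  let field_names := columns.map pvFn
  let lowered := aLowered field_names
  match aFindPat addressPatterns lowered with
  | some v => some v
  | none => aFallback field_names

-- ===== PORT B =====
-- 'RANK = {p: i for i, p in enumerate(ADDRESS_PATTERNS)}'
def rankMap : PySem.Dict String Int :=
  (PySem.List.enumerate addressPatterns 0).foldl (fun d p => PySem.Dict.insert d p.2 p.1)
    PySem.Dict.empty

-- one iteration of Source B's loop over the state (best, fallback)
def bStep (s : Option (Int × String) × Option String) (c : List (String × String)) :
    Option (Int × String) × Option String :=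
  let fn := pvFn c
  let low := PySem.Str.lower fn
  let best :=
    match PySem.Dict.get? rankMap low, s.1 with
    | some r, none => some (r, fn)
    | some r, some (r0, f0) => if r < r0 then some (r, fn) else some (r0, f0)
    | none, b => b
  let fb :=
    match s.2 with
    | none => if PySem.Str.isIn "addr" low then some fn else none
    | some f => some f
  (best, fb)

def detect_address_field_alt (columns : List (List (String × String))) : Option String :=
  let s := columns.foldl bStep (none, none)
  match s.1 with
  | some (_, fn) => some fn
  | none => s.2

-- ===== PRECONDITION & SPEC =====
-- Pre_ excludes lists in which two columns carry different spellings of the same lowered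
-- field name equal to an address pattern: a first-vs-last tie that no specification fixes
-- (A's dict keeps the last spelling, B's forward scan the first; both are defensible).
def Pre_detect_address_field (columns : List (List (String × String))) : Prop :=
  ∀ a ∈ columns.map pvFn, ∀ b ∈ columns.map pvFn,
    PySem.Str.lower a = PySem.Str.lower b → PySem.Str.lower a ∈ addressPatterns → a = b
instance (columns : List (List (String × String))) : Decidable (Pre_detect_address_field columns) := by
  unfold Pre_detect_address_field; infer_instance

def pvWitness_detect_address_field : (List (List (String × String))) :=
  [[("fieldName", "Site_Address")], [("name", "x")], [("fieldName", "notes")]]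

def Spec_detect_address_field (columns : List (List (String × String))) (out : Option String) : Prop := out = detect_address_field_alt columns
instance (columns : List (List (String × String))) (out : Option String) : Decidable (Spec_detect_address_field columns out) := by unfold Spec_detect_address_field; infer_instance

-- ===== CLAIM (what is proved, stated in full; the proofs are below) =====
def Claim_equal_detect_address_field : Prop := ∀ (columns : List (List (String × String))), Dom_detect_address_field columns → Pre_detect_address_field columns → Spec_detect_address_field columns (detect_address_field columns)

-- ===== LEMMAS AND PROOFS =====

-- first field name (scanning forward) whose lowering equals p
def fScanS (p : String) : List String → Option String
  | [] => none
  | fn :: rest => if PySem.Str.lower fn == p then some fn else fScanS p rest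

-- 'for p in ps: first fn with lower fn = p' (A's pattern loop re-expressed on first matches)
def firstScanPat : List String → List String → Option String
  | [], _ => none
  | p :: ps, fns =>
    match fScanS p fns with
    | some v => some v
    | none => firstScanPat ps fns

-- recursive characterisation of B's best-match accumulator (first column wins ties)
def bestRec : List (List (String × String)) → Option (Int × String)
  | [] => none
  | c :: rest =>
    match PySem.Dict.get? rankMap (PySem.Str.lower (pvFn c)), bestRec rest with
    | none, b => b
    | some r, none => some (r, pvFn c)
    | some r, some (r', f') => if r ≤ r' then some (r, pvFn c) else some (r', f')

lemma addr_of_address {l : List Char}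
    (h : PySem.Chars.isIn ['a','d','d','r','e','s','s'] l = true) :
    PySem.Chars.isIn ['a','d','d','r'] l = true := by
  rw [PySem.Chars.isIn_iff_infix] at h ⊢
  exact List.IsInfix.trans (by decide : (['a','d','d','r'] <:+: ['a','d','d','r','e','s','s'])) h

lemma aLowered_append (l : List String) (fn : String) :
    aLowered (l ++ [fn])
      = if fn ≠ "" then PySem.Dict.insert (aLowered l) (PySem.Str.lower fn) fn
        else aLowered l := by
  unfold aLowered
  rw [List.foldl_append]
  rfl

lemma lower_empty : PySem.Str.lower "" = "" := by decide

-- A's dict lookup is the LAST matching field name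
lemma get?_aLowered (p : String) (hp : p ≠ "") (fns : List String) :
    PySem.Dict.get? (aLowered fns) p = fScanS p fns.reverse := by
  induction fns using List.reverseRecOn with
  | nil => rfl
  | append_singleton l fn ih =>
    rw [aLowered_append, List.reverse_append, List.reverse_singleton, List.singleton_append]
    show _ = if PySem.Str.lower fn == p then some fn else fScanS p l.reverse
    by_cases hfc : fn = ""
    · rw [if_neg (by simp [hfc]), ih, if_neg ?_]
      rw [hfc, lower_empty]
      exact fun h => hp ((beq_iff_eq.mp h).symm)
    · rw [if_pos hfc]
      by_cases hpat : p = PySem.Str.lower fn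
      · rw [hpat, PySem.Dict.get?_insert_self, if_pos (beq_self_eq_true _)]
      · rw [PySem.Dict.get?_insert_of_ne _ _ hpat, ih,
          if_neg (fun h => hpat ((beq_iff_eq.mp h).symm))]

lemma fScanS_some {p v : String} {l : List String} (h : fScanS p l = some v) :
    v ∈ l ∧ PySem.Str.lower v = p := by
  induction l with
  | nil => simp [fScanS] at h
  | cons fn rest ih =>
    by_cases hm : (PySem.Str.lower fn == p) = true
    · rw [show fScanS p (fn :: rest) = some fn from by simp [fScanS, hm]] at h
      cases Option.some_inj.mp h
      exact ⟨List.mem_cons_self, beq_iff_eq.mp hm⟩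
    · rw [show fScanS p (fn :: rest) = fScanS p rest from by simp [fScanS, hm]] at h
      exact ⟨List.mem_cons_of_mem _ (ih h).1, (ih h).2⟩

lemma fScanS_none {p : String} {l : List String} (h : fScanS p l = none) :
    ∀ v ∈ l, PySem.Str.lower v ≠ p := by
  induction l with
  | nil => simp
  | cons fn rest ih =>
    by_cases hm : (PySem.Str.lower fn == p) = true
    · rw [show fScanS p (fn :: rest) = some fn from by simp [fScanS, hm]] at h
      exact absurd h (by simp)
    · rw [show fScanS p (fn :: rest) = fScanS p rest from by simp [fScanS, hm]] at h
      intro v hv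
      rcases List.mem_cons.mp hv with rfl | hv'
      · exact fun he => hm (beq_iff_eq.mpr he)
      · exact ih h v hv'

-- under Pre_, last match = first match for any pattern name
lemma scan_reverse_eq {p : String} (hpm : p ∈ addressPatterns) (fns : List String)
    (hpre : ∀ a ∈ fns, ∀ b ∈ fns,
      PySem.Str.lower a = PySem.Str.lower b → PySem.Str.lower a ∈ addressPatterns → a = b) :
    fScanS p fns.reverse = fScanS p fns := by
  cases h1 : fScanS p fns.reverse with
  | none =>
    cases h2 : fScanS p fns with
    | none => rfl
    | some v =>
      obtain ⟨hv, hl⟩ := fScanS_some h2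
      exact absurd hl (fScanS_none h1 v (List.mem_reverse.mpr hv))
  | some v =>
    obtain ⟨hv, hl⟩ := fScanS_some h1
    rw [List.mem_reverse] at hv
    cases h2 : fScanS p fns with
    | none => exact absurd hl (fScanS_none h2 v hv)
    | some w =>
      obtain ⟨hw, hlw⟩ := fScanS_some h2
      have : v = w := hpre v hv w hw (by rw [hl, hlw]) (by rw [hl]; exact hpm)
      rw [this]

-- A's pattern loop on the dict = the pattern loop on first matches (under Pre_)
lemma aFindPat_eq (ps : List String) (hps : ∀ p ∈ ps, p ≠ "" ∧ p ∈ addressPatterns)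
    (fns : List String)
    (hpre : ∀ a ∈ fns, ∀ b ∈ fns,
      PySem.Str.lower a = PySem.Str.lower b → PySem.Str.lower a ∈ addressPatterns → a = b) :
    aFindPat ps (aLowered fns) = firstScanPat ps fns := by
  induction ps with
  | nil => rfl
  | cons p ps ih =>
    have hp := hps p List.mem_cons_self
    simp only [aFindPat, firstScanPat]
    rw [get?_aLowered p hp.1, scan_reverse_eq hp.2 fns hpre]
    cases fScanS p fns with
    | some v => rfl
    | none => exact ih (fun q hq => hps q (List.mem_cons_of_mem _ hq))

-- the rank map is exactly first-index lookup in the pattern list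
lemma rank_eq_index (low : String) :
    PySem.Dict.get? rankMap low
      = (PySem.List.index? addressPatterns low).map (fun n => (n : Int)) := by
  by_cases hmem : low ∈ addressPatterns
  · simp only [addressPatterns, List.mem_cons, List.not_mem_nil, or_false] at hmem
    rcases hmem with rfl | rfl | rfl | rfl | rfl | rfl | rfl | rfl | rfl | rfl <;> decide
  · have hidx : PySem.List.index? addressPatterns low = none :=
      (PySem.List.index?_eq_none_iff _ _).mpr hmem
    have hnone : PySem.Dict.get? rankMap low = none := by
      cases hg : PySem.Dict.get? rankMap low with
      | none => rfl
      | some v =>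
        have hi := PySem.Dict.mem_items_of_get?_eq_some _ hg
        have hitems : rankMap.items
            = [("site_address", (0:Int)), ("site_addr", 1), ("full_address", 2), ("full_addr", 3),
               ("address", 4), ("addr", 5), ("permit_address", 6), ("address_full", 7),
               ("location_1", 8), ("location", 9)] := by decide
        rw [hitems] at hi
        simp only [List.mem_cons, List.not_mem_nil, or_false, Prod.mk.injEq] at hi
        exact absurd (by rcases hi with ⟨rfl, _⟩ | ⟨rfl, _⟩ | ⟨rfl, _⟩ | ⟨rfl, _⟩ | ⟨rfl, _⟩
                        | ⟨rfl, _⟩ | ⟨rfl, _⟩ | ⟨rfl, _⟩ | ⟨rfl, _⟩ | ⟨rfl, _⟩ <;> decide) hmem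
    rw [hidx, hnone]
    rfl

lemma rank_none (low : String)
    (h : PySem.List.index? addressPatterns low = none) :
    PySem.Dict.get? rankMap low = none := by
  rw [rank_eq_index, h]; rfl

lemma rank_some (low : String) (n : Nat)
    (h : PySem.List.index? addressPatterns low = some n) :
    PySem.Dict.get? rankMap low = some (n : Int) := by
  rw [rank_eq_index, h]; rfl

-- index? restricted to a prefix
lemma index?_take_none {l : List String} {v : String}
    (h : PySem.List.index? l v = none) (k : Nat) :
    PySem.List.index? (l.take k) v = none := by
  rw [PySem.List.index?_eq_none_iff] at h ⊢
  exact fun hm => h (List.mem_of_mem_take hm)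

lemma index?_take_some {l : List String} {v : String} {n : Nat}
    (h : PySem.List.index? l v = some n) : ∀ k : Nat,
    PySem.List.index? (l.take k) v = if n < k then some n else none := by
  induction l generalizing n with
  | nil => simp [PySem.List.index?] at h
  | cons x l ih =>
    intro k
    cases k with
    | zero => simp [PySem.List.index?]
    | succ k =>
      rw [List.take_succ_cons]
      by_cases hx : x = v
      · subst hx
        rw [PySem.List.index?_cons_self] at h
        cases Option.some_inj.mp h
        rw [PySem.List.index?_cons_self, if_pos (Nat.succ_pos _)]
      · rw [PySem.List.index?_cons_of_ne _ hx] at h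
        cases hl : PySem.List.index? l v with
        | none => rw [hl] at h; simp at h
        | some m =>
          rw [hl] at h
          simp only [Option.map_some] at h
          cases Option.some_inj.mp h
          rw [PySem.List.index?_cons_of_ne _ hx, ih hl k]
          by_cases hmk : m < k
          · rw [if_pos hmk, if_pos (by omega)]; rfl
          · rw [if_neg hmk, if_neg (by omega)]; rfl

lemma firstScanPat_nil (ps : List String) : firstScanPat ps [] = none := by
  induction ps with
  | nil => rfl
  | cons p ps ih => simp only [firstScanPat, fScanS]; exact ih

lemma firstScanPat_unfold (p : String) (ps : List String) (l : List String) :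
    firstScanPat (p :: ps) l = (fScanS p l).or (firstScanPat ps l) := by
  cases h : fScanS p l <;> simp [firstScanPat, h]

lemma fScanS_cons_of_ne {p fn : String} (fns : List String)
    (h : (PySem.Str.lower fn == p) = false) :
    fScanS p (fn :: fns) = fScanS p fns := by
  simp [fScanS, h]

lemma firstScanPat_cons_none {ps : List String} {fn : String} (fns : List String)
    (h : PySem.List.index? ps (PySem.Str.lower fn) = none) :
    firstScanPat ps (fn :: fns) = firstScanPat ps fns := by
  induction ps with
  | nil => rfl
  | cons p ps ih =>
    rw [PySem.List.index?_eq_none_iff] at h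
    have hp : p ≠ PySem.Str.lower fn := fun he => h (he ▸ List.mem_cons_self)
    have hne : (PySem.Str.lower fn == p) = false := by
      rw [beq_eq_false_iff_ne]; exact fun he => hp he.symm
    rw [firstScanPat_unfold, firstScanPat_unfold, fScanS_cons_of_ne _ hne,
      ih ((PySem.List.index?_eq_none_iff _ _).mpr (fun hm => h (List.mem_cons_of_mem _ hm)))]

lemma firstScanPat_cons_some {ps : List String} {fn : String} {j : Nat} (fns : List String)
    (h : PySem.List.index? ps (PySem.Str.lower fn) = some j) :
    firstScanPat ps (fn :: fns) = (firstScanPat (ps.take j) fns).or (some fn) := by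
  induction ps generalizing j with
  | nil => simp [PySem.List.index?] at h
  | cons p ps ih =>
    by_cases hp : p = PySem.Str.lower fn
    · subst hp
      rw [PySem.List.index?_cons_self] at h
      cases Option.some_inj.mp h
      rw [firstScanPat_unfold,
        show fScanS (PySem.Str.lower fn) (fn :: fns) = some fn from by simp [fScanS]]
      simp [firstScanPat]
    · have hne : (PySem.Str.lower fn == p) = false := by
        rw [beq_eq_false_iff_ne]; exact fun he => hp he.symm
      rw [PySem.List.index?_cons_of_ne _ hp] at h
      cases hl : PySem.List.index? ps (PySem.Str.lower fn) with
      | none => rw [hl] at h; simp at h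
      | some m =>
        rw [hl] at h
        simp only [Option.map_some] at h
        cases Option.some_inj.mp h
        rw [firstScanPat_unfold, fScanS_cons_of_ne _ hne, ih hl, List.take_succ_cons,
          firstScanPat_unfold, Option.or_assoc]

-- conditional unfoldings of B's best accumulator
def filt (k : Nat) : Option (Int × String) → Option String
  | none => none
  | some (r, f) => if r < (k : Int) then some f else none

def combine (r : Int) (fn : String) : Option (Int × String) → Option (Int × String)
  | none => some (r, fn)
  | some (r', f') => if r ≤ r' then some (r, fn) else some (r', f')

lemma bestRec_cons_none {c : List (String × String)} (rest : List (List (String × String)))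
    (h : PySem.Dict.get? rankMap (PySem.Str.lower (pvFn c)) = none) :
    bestRec (c :: rest) = bestRec rest := by
  simp only [bestRec, h]

lemma bestRec_cons_some {c : List (String × String)} {r : Int}
    (rest : List (List (String × String)))
    (h : PySem.Dict.get? rankMap (PySem.Str.lower (pvFn c)) = some r) :
    bestRec (c :: rest) = combine r (pvFn c) (bestRec rest) := by
  simp only [bestRec, h]
  cases bestRec rest with
  | none => rfl
  | some p => obtain ⟨r', f'⟩ := p; rfl

-- main bridge: the pattern loop over a prefix = B's best accumulator filtered to ranks < k
lemma firstScanPat_eq_bestRec (cols : List (List (String × String))) : ∀ k : Nat,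
    firstScanPat (addressPatterns.take k) (cols.map pvFn) = filt k (bestRec cols) := by
  induction cols with
  | nil => intro k; simp [firstScanPat_nil, bestRec, filt]
  | cons c rest ih =>
    intro k
    rw [List.map_cons]
    cases hidx : PySem.List.index? addressPatterns (PySem.Str.lower (pvFn c)) with
    | none =>
      rw [firstScanPat_cons_none _ (index?_take_none hidx k), ih k,
        bestRec_cons_none _ (rank_none _ hidx)]
    | some n =>
      rw [bestRec_cons_some _ (rank_some _ _ hidx)]
      by_cases hnk : n < k
      · rw [firstScanPat_cons_some _
            (by rw [index?_take_some hidx k, if_pos hnk]),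
          List.take_take, Nat.min_eq_left hnk.le, ih n]
        cases hb : bestRec rest with
        | none =>
          simp only [filt, combine, Option.none_or]
          rw [if_pos (by omega)]
        | some p =>
          obtain ⟨r', f'⟩ := p
          simp only [filt, combine]
          by_cases hr : r' < (n : Int)
          · rw [if_pos hr, if_neg (by omega)]
            simp only [Option.some_or]
            rw [if_pos (by omega)]
          · rw [if_neg hr, if_pos (by omega)]
            simp only [Option.none_or]
            rw [if_pos (by omega)]
      · rw [firstScanPat_cons_none _
            (by rw [index?_take_some hidx k, if_neg hnk]), ih k]
        cases hb : bestRec rest with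
        | none =>
          simp only [filt, combine]
          rw [if_neg (by omega)]
        | some p =>
          obtain ⟨r', f'⟩ := p
          simp only [filt, combine]
          by_cases hr : (n : Int) ≤ r'
          · rw [if_pos hr]
            simp only []
            rw [if_neg (by omega), if_neg (by omega)]
          · rw [if_neg hr]

-- B's exact ranks are always below the number of patterns
lemma bestRec_lt (cols : List (List (String × String))) {r : Int} {f : String}
    (h : bestRec cols = some (r, f)) : 0 ≤ r ∧ r < 10 := by
  induction cols generalizing r f with
  | nil => simp [bestRec] at h
  | cons c rest ih =>
    cases hidx : PySem.List.index? addressPatterns (PySem.Str.lower (pvFn c)) with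
    | none =>
      rw [bestRec_cons_none _ (rank_none _ hidx)] at h
      exact ih h
    | some n =>
      obtain ⟨hn, -, -⟩ := PySem.List.getElem_of_index?_eq_some hidx
      have hn10 : n < 10 := by simpa [addressPatterns] using hn
      rw [bestRec_cons_some _ (rank_some _ _ hidx)] at h
      cases hb : bestRec rest with
      | none =>
        rw [hb] at h
        simp only [combine, Option.some_inj, Prod.mk.injEq] at h
        obtain ⟨rfl, -⟩ := h
        constructor <;> omega
      | some p =>
        obtain ⟨r', f'⟩ := p
        rw [hb] at h
        have ih' := ih hb
        simp only [combine] at h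
        split_ifs at h with hle <;>
          simp only [Option.some_inj, Prod.mk.injEq] at h <;>
          obtain ⟨h1, -⟩ := h
        · exact ⟨by omega, by omega⟩
        · exact h1 ▸ ih'

-- the fold of B's step splits into independent best / fallback folds
def stepE (b : Option (Int × String)) (c : List (String × String)) : Option (Int × String) :=
  match PySem.Dict.get? rankMap (PySem.Str.lower (pvFn c)), b with
  | some r, none => some (r, pvFn c)
  | some r, some (r0, f0) => if r < r0 then some (r, pvFn c) else some (r0, f0)
  | none, b => b

def stepF (f : Option String) (c : List (String × String)) : Option String :=
  match f with
  | none => if PySem.Str.isIn "addr" (PySem.Str.lower (pvFn c)) then some (pvFn c) else none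
  | some v => some v

lemma foldl_bStep_split (cols : List (List (String × String))) :
    ∀ b0 f0, cols.foldl bStep (b0, f0) = (cols.foldl stepE b0, cols.foldl stepF f0) := by
  induction cols with
  | nil => intro b0 f0; rfl
  | cons c rest ih =>
    intro b0 f0
    rw [List.foldl_cons, List.foldl_cons, List.foldl_cons]
    have hstep : bStep (b0, f0) c = (stepE b0 c, stepF f0 c) := by
      simp only [bStep, stepE, stepF]
    rw [hstep, ih]

def mergeB : Option (Int × String) → Option (Int × String) → Option (Int × String)
  | b0, none => b0
  | none, some x => some x
  | some (r0, f0), some (r, f) => if r < r0 then some (r, f) else some (r0, f0)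

lemma mergeB_none (b0 : Option (Int × String)) : mergeB b0 none = b0 := by
  cases b0 with
  | none => rfl
  | some p => obtain ⟨r0, f0⟩ := p; rfl

lemma stepE_of_none {c : List (String × String)} (b0 : Option (Int × String))
    (h : PySem.Dict.get? rankMap (PySem.Str.lower (pvFn c)) = none) :
    stepE b0 c = b0 := by
  cases b0 with
  | none => simp only [stepE, h]
  | some p => obtain ⟨r0, f0⟩ := p; simp only [stepE, h]

lemma stepE_none_of_some {c : List (String × String)} {r : Int}
    (h : PySem.Dict.get? rankMap (PySem.Str.lower (pvFn c)) = some r) :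
    stepE none c = some (r, pvFn c) := by
  simp only [stepE, h]

lemma stepE_some_of_some {c : List (String × String)} {r r0 : Int} {f0 : String}
    (h : PySem.Dict.get? rankMap (PySem.Str.lower (pvFn c)) = some r) :
    stepE (some (r0, f0)) c = if r < r0 then some (r, pvFn c) else some (r0, f0) := by
  simp only [stepE, h]

lemma foldl_stepE_eq (cols : List (List (String × String))) : ∀ b0,
    cols.foldl stepE b0 = mergeB b0 (bestRec cols) := by
  induction cols with
  | nil => intro b0; rw [List.foldl_nil, bestRec, mergeB_none]
  | cons c rest ih =>
    intro b0
    rw [List.foldl_cons, ih]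
    cases hg : PySem.Dict.get? rankMap (PySem.Str.lower (pvFn c)) with
    | none => rw [stepE_of_none b0 hg, bestRec_cons_none _ hg]
    | some r =>
      rw [bestRec_cons_some _ hg]
      cases b0 with
      | none =>
        rw [stepE_none_of_some hg]
        cases hb : bestRec rest with
        | none => rfl
        | some p =>
          obtain ⟨r', f'⟩ := p
          simp only [mergeB, combine]
          split_ifs <;> first | rfl | (exfalso; omega)
      | some q =>
        obtain ⟨r0, f0⟩ := q
        rw [stepE_some_of_some hg]
        cases hb : bestRec rest with
        | none =>
          simp only [combine, mergeB]
        | some p =>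
          obtain ⟨r', f'⟩ := p
          by_cases h0 : r < r0 <;> by_cases hle : r ≤ r' <;>
            simp only [combine, h0, hle, if_true, if_false, mergeB] <;>
            split_ifs <;> first | rfl | (exfalso; omega)

lemma foldl_stepF_some (cols : List (List (String × String))) (v : String) :
    cols.foldl stepF (some v) = some v := by
  induction cols with
  | nil => rfl
  | cons c rest ih => rw [List.foldl_cons]; exact ih

lemma foldl_stepF_eq (cols : List (List (String × String))) :
    cols.foldl stepF none = aFallback (cols.map pvFn) := by
  induction cols with
  | nil => rfl
  | cons c rest ih =>
    rw [List.foldl_cons, List.map_cons]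
    cases h : PySem.Chars.isIn ['a','d','d','r'] (PySem.Chars.lower (pvFn c).toList) with
    | true =>
      have hstep : stepF none c = some (pvFn c) := by
        simp only [stepF]
        rw [if_pos]
        show PySem.Chars.isIn _ _ = true
        simpa using h
      rw [hstep, foldl_stepF_some]
      simp only [aFallback]
      rw [if_pos]
      simp only [PySem.Str.isIn]
      simp [h]
    | false =>
      have ha : PySem.Chars.isIn ['a','d','d','r','e','s','s'] (PySem.Chars.lower (pvFn c).toList) = false := by
        by_contra hc
        rw [Bool.not_eq_false] at hc
        exact absurd (addr_of_address hc) (by simp [h])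
      have hstep : stepF none c = none := by
        simp only [stepF]
        rw [if_neg]
        show ¬ (PySem.Chars.isIn _ _ = true)
        simp [h]
      rw [hstep, ih]
      simp only [aFallback]
      rw [if_neg]
      simp only [PySem.Str.isIn]
      simp [h, ha]

-- ===== VERDICT (by name: the statement is the Claim_ definition above) =====
theorem detect_address_field_spec : Claim_equal_detect_address_field := by
  intro columns _ hpre
  show detect_address_field columns = detect_address_field_alt columns
  unfold detect_address_field detect_address_field_alt
  simp only []
  rw [foldl_bStep_split, foldl_stepE_eq, foldl_stepF_eq]
  rw [show mergeB none (bestRec columns) = bestRec columns from by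
    cases hb : bestRec columns with
    | none => rfl
    | some p => obtain ⟨r, f⟩ := p; rfl]
  rw [aFindPat_eq addressPatterns (by decide) (columns.map pvFn) hpre]
  have h10 : addressPatterns = addressPatterns.take 10 := rfl
  rw [h10, firstScanPat_eq_bestRec columns 10]
  cases hb : bestRec columns with
  | none => rfl
  | some p =>
    obtain ⟨r, f⟩ := p
    have := bestRec_lt columns hb
    simp only [filt]
    rw [if_pos (by omega)]
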